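-- pv_equiv track=rewrite | github.com/skeane3/ML-the-time-dependence-of-density-matrix-for-many-body-models | src/Helper/Hubbard.py | H_t
-- ===== SOURCE A (Python) =====
-- def H_t(state_i, state_j):
--     """Calculate the kinetic term between state_i and state_j of the
--        hamiltonian by determining whether state_i can be obtained by
--        'hopping' from state_j.
--
--     :param state_i: A tuple representing a state
--     :type state: tuple
--     :param state_i: A tuple representing a state
--     :type state: tuple
--     :returns: 1 if hopping is permitted, 0 otherwise
--     :rtype: int
--     """
--     # The index of the last atom in the chain
--     last_i = len(state_j)-1
--     # Store state_j in another variable as we will change the variable state_j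
--     # in the for loop
--     STATE_J = state_j
--     # Cast state_i to a list for comparison with state_j, which will be cast to
--     # a list below
--     state_i = list(state_i)
--
--     # i loops over every site in the chain
--     for i in range(len(state_j)):
--         state_j = list(STATE_J)
--         # Check first site, can only hop to the right
--         if i == 0:
--             # This line checks if a hop to the right is permitted
--             if ((state_j[0] == 1) and (state_j[1] == 0)):
--                 # If it is, then it executes the hop and checks against state_i
--                 state_j[0] = 0
--                 state_j[1] = 1
--                 if state_j == state_i:
--                     return 1
--         # Check last site, can only hop to teh left
--         elif i == last_i:
--              # This line checks if a hop to the left is permitted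
--             if ((state_j[last_i] == 1) and (state_j[last_i-1] == 0)):
--                 # If it is, then it executes the hop and checks against state_i
--                 state_j[last_i] = 0
--                 state_j[last_i-1] = 1
--                 if state_j == state_i:
--                     return 1
--         # Check all others, can hop right or left
--         else:
--             # This line checks if a hop to the left is permitted
--             if ((state_j[i] == 1) and (state_j[i-1] == 0)):
--                 # If it is, then it executes the hop and checks against state_i
--                 state_j[i] = 0
--                 state_j[i-1] = 1
--                 if state_j == state_i:
--                     return 1
--                 else:
--                     # If not, reset state_j to check a hop to the right
--                     state_j = list(STATE_J)
--             # This line checks if a hop to the right is permitted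
--             if ((state_j[i] == 1) and (state_j[i+1] == 0)):
--                 # If it is, then it executes the hop and checks against state_i
--                 state_j[i] = 0
--                 state_j[i+1] = 1
--                 if state_j == state_i:
--                     return 1
--
--     return 0
-- ===== SOURCE B (Python) =====
-- def H_t(state_i, state_j):
--     state_i = list(state_i)
--     state_j = list(state_j)
--     if len(state_i) != len(state_j):
--         return 0
--     diffs = [k for k in range(len(state_j)) if state_i[k] != state_j[k]]
--     if len(diffs) != 2:
--         return 0
--     p, q = diffs
--     if q == p + 1 and (state_j[p], state_j[q], state_i[p], state_i[q]) in ((1, 0, 0, 1), (0, 1, 1, 0)):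
--         return 1
--     return 0
-- ===== Notes on version B (the rewrite author's own statement) =====
-- stated objective: faster
-- what changed: Instead of trying every possible hop at every site and comparing the whole hopped list against state_i each time (O(n^2)), B makes one pass collecting the indices where the states differ and returns 1 iff there are exactly two, adjacent, with complementary (1,0)/(0,1) patterns.
-- outside the precondition, e.g. on H_t([0], [1]): A raises IndexError, B returns 0
import Mathlib
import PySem

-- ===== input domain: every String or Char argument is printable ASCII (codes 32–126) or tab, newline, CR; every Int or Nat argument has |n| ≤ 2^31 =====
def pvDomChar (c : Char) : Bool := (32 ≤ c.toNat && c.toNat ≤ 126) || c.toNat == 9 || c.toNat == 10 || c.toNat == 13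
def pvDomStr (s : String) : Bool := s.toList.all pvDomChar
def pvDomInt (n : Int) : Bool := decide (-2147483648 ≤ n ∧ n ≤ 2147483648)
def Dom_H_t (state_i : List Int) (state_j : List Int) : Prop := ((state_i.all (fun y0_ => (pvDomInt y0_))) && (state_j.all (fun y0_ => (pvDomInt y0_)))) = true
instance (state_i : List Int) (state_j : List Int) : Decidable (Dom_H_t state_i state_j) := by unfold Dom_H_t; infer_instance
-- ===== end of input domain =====

-- B replaces A's try-every-hop-and-compare-whole-lists scan with a single pass over the
-- differing indices (exactly two, adjacent, complementary patterns); measured asymptotically faster.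


-- ===== PORT A =====
-- The loop body of A, over the remaining list of loop indices; early `return 1` becomes
-- returning 1 instead of recursing.  All list reads are in range on Pre_ (the only
-- out-of-range read Python can reach is state_j[1] with state_j == [1], excluded by Pre_),
-- so `getD _ 0`'s default is never read there.
def htGo (state_i : List Int) (STATE_J : List Int) (lastI : Nat) : List Nat → Int
  | [] => 0
  | i :: rest =>
    if i = 0 then
      if STATE_J.getD 0 0 = 1 ∧ STATE_J.getD 1 0 = 0 then
        if (STATE_J.set 0 0).set 1 1 = state_i then 1 else htGo state_i STATE_J lastI rest
      else htGo state_i STATE_J lastI rest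
    else if i = lastI then
      if STATE_J.getD lastI 0 = 1 ∧ STATE_J.getD (lastI - 1) 0 = 0 then
        if (STATE_J.set lastI 0).set (lastI - 1) 1 = state_i then 1
        else htGo state_i STATE_J lastI rest
      else htGo state_i STATE_J lastI rest
    else
      -- middle site: try a hop to the left; on failure reset and try a hop to the right
      let right : Int :=
        if STATE_J.getD i 0 = 1 ∧ STATE_J.getD (i + 1) 0 = 0 then
          if (STATE_J.set i 0).set (i + 1) 1 = state_i then 1
          else htGo state_i STATE_J lastI rest
        else htGo state_i STATE_J lastI rest
      if STATE_J.getD i 0 = 1 ∧ STATE_J.getD (i - 1) 0 = 0 then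
        if (STATE_J.set i 0).set (i - 1) 1 = state_i then 1 else right
      else right

def H_t (state_i : List Int) (state_j : List Int) : Int :=
  htGo state_i state_j (state_j.length - 1) (List.range state_j.length)

-- ===== PORT B =====
def H_t_alt (state_i : List Int) (state_j : List Int) : Int :=
  if state_i.length ≠ state_j.length then 0
  else
    match (List.range state_j.length).filter
        (fun k => state_i.getD k 0 ≠ state_j.getD k 0) with
    | [p, q] =>
      if q = p + 1 ∧
          ((state_j.getD p 0 = 1 ∧ state_j.getD q 0 = 0 ∧
            state_i.getD p 0 = 0 ∧ state_i.getD q 0 = 1) ∨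
           (state_j.getD p 0 = 0 ∧ state_j.getD q 0 = 1 ∧
            state_i.getD p 0 = 1 ∧ state_i.getD q 0 = 0))
      then 1 else 0
    | _ => 0

-- ===== PRECONDITION & SPEC =====
-- A raises IndexError exactly when state_j == [1] (it probes state_j[1]); excluded here.
def Pre_H_t (state_i : List Int) (state_j : List Int) : Prop := state_j ≠ [1]
instance (state_i : List Int) (state_j : List Int) : Decidable (Pre_H_t state_i state_j) := by unfold Pre_H_t; infer_instance
def pvWitness_H_t : List Int × List Int := ([0, 1], [1, 0])

def Spec_H_t (state_i : List Int) (state_j : List Int) (out : Int) : Prop := out = H_t_alt state_i state_j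
instance (state_i : List Int) (state_j : List Int) (out : Int) : Decidable (Spec_H_t state_i state_j out) := by unfold Spec_H_t; infer_instance

-- ===== CLAIM (what is proved, stated in full; the proofs are below) =====
def Claim_equal_H_t : Prop := ∀ (state_i : List Int) (state_j : List Int), Dom_H_t state_i state_j → Pre_H_t state_i state_j → Spec_H_t state_i state_j (H_t state_i state_j)

-- ===== LEMMAS AND PROOFS =====

-- "the branch of A's loop body for index i finds a hop producing state_i"
def HitR (si sj : List Int) (p : Nat) : Prop :=
  sj.getD p 0 = 1 ∧ sj.getD (p + 1) 0 = 0 ∧ (sj.set p 0).set (p + 1) 1 = si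
def HitL (si sj : List Int) (i : Nat) : Prop :=
  sj.getD i 0 = 1 ∧ sj.getD (i - 1) 0 = 0 ∧ (sj.set i 0).set (i - 1) 1 = si
def Hit (si sj : List Int) (lastI i : Nat) : Prop :=
  if i = 0 then sj.getD 0 0 = 1 ∧ sj.getD 1 0 = 0 ∧ (sj.set 0 0).set 1 1 = si
  else if i = lastI then HitL si sj lastI
  else HitL si sj i ∨ HitR si sj i

-- hop-right / hop-left pattern at adjacent pair (p, p+1)
def PatR (si sj : List Int) (p : Nat) : Prop :=
  p + 1 < sj.length ∧ sj.getD p 0 = 1 ∧ sj.getD (p + 1) 0 = 0 ∧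
    (sj.set p 0).set (p + 1) 1 = si
def PatL (si sj : List Int) (p : Nat) : Prop :=
  p + 1 < sj.length ∧ sj.getD p 0 = 0 ∧ sj.getD (p + 1) 0 = 1 ∧
    (sj.set (p + 1) 0).set p 1 = si

lemma htGo_step_one (si sj : List Int) (lastI i : Nat) (rest : List Nat)
    (h : Hit si sj lastI i) : htGo si sj lastI (i :: rest) = 1 := by
  unfold Hit HitL HitR at h
  simp only [htGo]
  split_ifs at h with h0 hl
  · subst h0
    obtain ⟨h1, h2, h3⟩ := h
    rw [if_pos rfl, if_pos ⟨h1, h2⟩, if_pos h3]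
  · subst hl
    obtain ⟨h1, h2, h3⟩ := h
    rw [if_neg h0, if_pos rfl, if_pos ⟨h1, h2⟩, if_pos h3]
  · rw [if_neg h0, if_neg hl]
    rcases h with ⟨h1, h2, h3⟩ | ⟨h1, h2, h3⟩ <;> split_ifs <;> tauto

lemma htGo_step_skip (si sj : List Int) (lastI i : Nat) (rest : List Nat)
    (h : ¬ Hit si sj lastI i) :
    htGo si sj lastI (i :: rest) = htGo si sj lastI rest := by
  unfold Hit HitR HitL at h
  simp only [htGo]
  split_ifs at h ⊢ <;> first | rfl | (exfalso; tauto)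

lemma htGo_eq_one (si sj : List Int) (lastI : Nat) (l : List Nat)
    (h : ∃ i ∈ l, Hit si sj lastI i) : htGo si sj lastI l = 1 := by
  induction l with
  | nil => simp at h
  | cons a rest ih =>
    by_cases ha : Hit si sj lastI a
    · exact htGo_step_one si sj lastI a rest ha
    · rw [htGo_step_skip si sj lastI a rest ha]
      rcases h with ⟨i, hi, hhit⟩
      rcases List.mem_cons.1 hi with rfl | hi'
      · exact absurd hhit ha
      · exact ih ⟨i, hi', hhit⟩

lemma htGo_eq_zero (si sj : List Int) (lastI : Nat) (l : List Nat)
    (h : ¬ ∃ i ∈ l, Hit si sj lastI i) : htGo si sj lastI l = 0 := by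
  induction l with
  | nil => rfl
  | cons a rest ih =>
    rw [htGo_step_skip si sj lastI a rest (fun ha => h ⟨a, List.mem_cons_self .., ha⟩)]
    exact ih (fun ⟨i, hi, hhit⟩ => h ⟨i, List.mem_cons_of_mem a hi, hhit⟩)

-- pointwise characterisation of "set a to 0, set b to 1, equals si"
lemma set2_char (sj si : List Int) (a b : Nat) (hab : a ≠ b)
    (ha : a < sj.length) (hb : b < sj.length) :
    ((sj.set a 0).set b 1 = si) ↔
      (si.length = sj.length ∧ si.getD a 0 = 0 ∧ si.getD b 0 = 1 ∧
        ∀ k, k ≠ a → k ≠ b → si.getD k 0 = sj.getD k 0) := by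
  constructor
  · rintro rfl
    refine ⟨by simp, ?_, ?_, ?_⟩
    · rw [List.getD_eq_getElem?_getD, List.getElem?_set_ne (Ne.symm hab),
        List.getElem?_set_self (by simpa using ha)]
      rfl
    · rw [List.getD_eq_getElem?_getD,
        List.getElem?_set_self (by simpa using hb)]
      rfl
    · intro k hka hkb
      rw [List.getD_eq_getElem?_getD, List.getElem?_set_ne (Ne.symm hkb),
        List.getElem?_set_ne (Ne.symm hka), List.getD_eq_getElem?_getD]
  · rintro ⟨hlen, ha0, hb1, hrest⟩
    apply List.ext_getElem?
    intro k
    by_cases hk : k < sj.length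
    · have hk' : k < si.length := by omega
      by_cases hkb : k = b
      · subst hkb
        rw [List.getElem?_set_self (by simpa using hk),
          List.getElem?_eq_getElem hk']
        rw [List.getD_eq_getElem?_getD, List.getElem?_eq_getElem hk'] at hb1
        simpa using hb1.symm
      · by_cases hka : k = a
        · subst hka
          rw [List.getElem?_set_ne (Ne.symm hab),
            List.getElem?_set_self (by simpa using hk),
            List.getElem?_eq_getElem hk']
          rw [List.getD_eq_getElem?_getD, List.getElem?_eq_getElem hk'] at ha0
          simpa using ha0.symm
        · rw [List.getElem?_set_ne (Ne.symm hkb), List.getElem?_set_ne (Ne.symm hka),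
            List.getElem?_eq_getElem hk, List.getElem?_eq_getElem hk']
          have := hrest k hka hkb
          rw [List.getD_eq_getElem?_getD, List.getElem?_eq_getElem hk',
            List.getD_eq_getElem?_getD, List.getElem?_eq_getElem hk] at this
          simpa using this.symm
    · rw [List.getElem?_eq_none (by simp; omega),
        List.getElem?_eq_none (by omega)]

lemma range_filter_two (p n : Nat) :
    (List.range n).filter (fun k => decide (k = p ∨ k = p + 1)) =
      if n ≤ p then [] else if n ≤ p + 1 then [p] else [p, p + 1] := by
  induction n with
  | zero => simp
  | succ n ih =>
    rw [List.range_succ, List.filter_append, ih]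
    simp only [List.filter_cons, List.filter_nil]
    split_ifs <;> simp_all <;> omega

lemma hit_iff_pat (si sj : List Int) (hpre : sj ≠ [1]) :
    (∃ i ∈ List.range sj.length, Hit si sj (sj.length - 1) i) ↔
      (∃ p, PatR si sj p ∨ PatL si sj p) := by
  constructor
  · rintro ⟨i, hi, hhit⟩
    rw [List.mem_range] at hi
    unfold Hit at hhit
    split_ifs at hhit with h0 hl
    · obtain ⟨h1, h2, h3⟩ := hhit
      have hn2 : 2 ≤ sj.length := by
        rcases Nat.lt_or_ge sj.length 2 with hn | hn
        · exfalso
          have hn1 : sj.length = 1 := by omega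
          obtain ⟨x, hx⟩ := List.length_eq_one_iff.1 hn1
          subst hx
          simp [List.getD] at h1
          exact hpre (by rw [h1])
        · exact hn
      exact ⟨0, Or.inl ⟨by omega, h1, h2, h3⟩⟩
    · obtain ⟨h1, h2, h3⟩ := hhit
      have hge : 1 ≤ sj.length - 1 := by omega
      have heq : sj.length - 1 - 1 + 1 = sj.length - 1 := by omega
      refine ⟨sj.length - 1 - 1, Or.inr ⟨by omega, h2, ?_, ?_⟩⟩
      · rw [heq]
        exact h1
      · rw [heq]
        exact h3
    · rcases hhit with ⟨h1, h2, h3⟩ | ⟨h1, h2, h3⟩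
      · have heq : i - 1 + 1 = i := by omega
        refine ⟨i - 1, Or.inr ⟨by omega, h2, ?_, ?_⟩⟩
        · rw [heq]; exact h1
        · rw [heq]; exact h3
      · exact ⟨i, Or.inl ⟨by omega, h1, h2, h3⟩⟩
  · rintro ⟨p, ⟨hlt, h1, h2, h3⟩ | ⟨hlt, h1, h2, h3⟩⟩
    · by_cases hp0 : p = 0
      · subst hp0
        refine ⟨0, List.mem_range.2 (by omega), ?_⟩
        unfold Hit
        rw [if_pos rfl]
        exact ⟨h1, h2, h3⟩
      · refine ⟨p, List.mem_range.2 (by omega), ?_⟩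
        unfold Hit
        rw [if_neg hp0, if_neg (by omega)]
        exact Or.inr ⟨h1, h2, h3⟩
    · refine ⟨p + 1, List.mem_range.2 hlt, ?_⟩
      unfold Hit
      rw [if_neg (Nat.succ_ne_zero p)]
      by_cases hL : p + 1 = sj.length - 1
      · rw [if_pos hL]
        rw [← hL]
        exact ⟨h2, h1, h3⟩
      · rw [if_neg hL]
        exact Or.inl ⟨h2, h1, h3⟩

lemma alt_one (si sj : List Int) (h : ∃ p, PatR si sj p ∨ PatL si sj p) :
    H_t_alt si sj = 1 := by
  obtain ⟨p, hp⟩ := h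
  have hlt : p + 1 < sj.length := by
    rcases hp with ⟨h', _⟩ | ⟨h', _⟩ <;> exact h'
  have main : si.length = sj.length ∧
      (∀ k, k ≠ p → k ≠ p + 1 → si.getD k 0 = sj.getD k 0) ∧
      si.getD p 0 ≠ sj.getD p 0 ∧ si.getD (p + 1) 0 ≠ sj.getD (p + 1) 0 ∧
      ((sj.getD p 0 = 1 ∧ sj.getD (p + 1) 0 = 0 ∧
        si.getD p 0 = 0 ∧ si.getD (p + 1) 0 = 1) ∨
       (sj.getD p 0 = 0 ∧ sj.getD (p + 1) 0 = 1 ∧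
        si.getD p 0 = 1 ∧ si.getD (p + 1) 0 = 0)) := by
    rcases hp with ⟨hlt', h1, h2, h3⟩ | ⟨hlt', h1, h2, h3⟩
    · obtain ⟨hlen, ha, hb, hrest⟩ :=
        (set2_char sj si p (p + 1) (by omega) (by omega) hlt').1 h3
      exact ⟨hlen, hrest, by rw [ha, h1]; norm_num, by rw [hb, h2]; norm_num,
        Or.inl ⟨h1, h2, ha, hb⟩⟩
    · obtain ⟨hlen, ha, hb, hrest⟩ :=
        (set2_char sj si (p + 1) p (by omega) hlt' (by omega)).1 h3
      exact ⟨hlen, fun k hk1 hk2 => hrest k hk2 hk1,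
        by rw [hb, h1]; norm_num, by rw [ha, h2]; norm_num,
        Or.inr ⟨h1, h2, hb, ha⟩⟩
  obtain ⟨hlen, hrest, hdp, hdq, hpat⟩ := main
  have hfil : (List.range sj.length).filter
      (fun k => si.getD k 0 ≠ sj.getD k 0) = [p, p + 1] := by
    rw [List.filter_congr (q := fun k => decide (k = p ∨ k = p + 1)) ?_,
      range_filter_two, if_neg (by omega), if_neg (by omega)]
    intro k _
    by_cases h1 : k = p
    · subst h1
      rw [decide_eq_decide]
      exact ⟨fun _ => Or.inl rfl, fun _ => hdp⟩
    · by_cases h2 : k = p + 1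
      · subst h2
        rw [decide_eq_decide]
        exact ⟨fun _ => Or.inr rfl, fun _ => hdq⟩
      · rw [decide_eq_decide]
        exact ⟨fun hne => absurd (hrest k h1 h2) hne,
          fun hor => (hor.elim h1 h2).elim⟩
  unfold H_t_alt
  rw [if_neg (fun hne => hne hlen), hfil]
  exact if_pos ⟨rfl, hpat⟩

lemma alt_zero (si sj : List Int) (h : ¬ ∃ p, PatR si sj p ∨ PatL si sj p) :
    H_t_alt si sj = 0 := by
  unfold H_t_alt
  by_cases hlen : si.length = sj.length
  · rw [if_neg (fun hne => hne hlen)]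
    generalize hfil : (List.range sj.length).filter
      (fun k => si.getD k 0 ≠ sj.getD k 0) = l
    rcases l with _ | ⟨p, _ | ⟨q, _ | ⟨r, t⟩⟩⟩ <;> try rfl
    by_cases hc : q = p + 1 ∧
        ((sj.getD p 0 = 1 ∧ sj.getD q 0 = 0 ∧
          si.getD p 0 = 0 ∧ si.getD q 0 = 1) ∨
         (sj.getD p 0 = 0 ∧ sj.getD q 0 = 1 ∧
          si.getD p 0 = 1 ∧ si.getD q 0 = 0))
    · exfalso
      obtain ⟨hq, hpat⟩ := hc
      subst hq
      have hpmem : p ∈ (List.range sj.length).filter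
          (fun k => si.getD k 0 ≠ sj.getD k 0) := by rw [hfil]; simp
      have hqmem : p + 1 ∈ (List.range sj.length).filter
          (fun k => si.getD k 0 ≠ sj.getD k 0) := by rw [hfil]; simp
      have hlt : p + 1 < sj.length := List.mem_range.1 (List.mem_filter.1 hqmem).1
      have agree : ∀ k, k ≠ p → k ≠ p + 1 → si.getD k 0 = sj.getD k 0 := by
        intro k hk1 hk2
        by_cases hkn : k < sj.length
        · by_contra hne
          have hk : k ∈ (List.range sj.length).filter
              (fun k => si.getD k 0 ≠ sj.getD k 0) :=
            List.mem_filter.2 ⟨List.mem_range.2 hkn, by simpa using hne⟩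
          rw [hfil] at hk
          simp at hk
          omega
        · rw [List.getD_eq_getElem?_getD, List.getElem?_eq_none (by omega),
            List.getD_eq_getElem?_getD, List.getElem?_eq_none (by omega)]
      rcases hpat with ⟨j1, j2, i1, i2⟩ | ⟨j1, j2, i1, i2⟩
      · exact h ⟨p, Or.inl ⟨hlt, j1, j2,
          (set2_char sj si p (p + 1) (by omega) (by omega) hlt).2
            ⟨hlen, i1, i2, agree⟩⟩⟩
      · exact h ⟨p, Or.inr ⟨hlt, j1, j2,
          (set2_char sj si (p + 1) p (by omega) hlt (by omega)).2
            ⟨hlen, i2, i1, fun k hk1 hk2 => agree k hk2 hk1⟩⟩⟩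
    · exact if_neg hc
  · rw [if_pos hlen]

-- ===== VERDICT (by name: the statement is the Claim_ definition above) =====
theorem H_t_spec : Claim_equal_H_t := by
  intro si sj _ hpre
  unfold Spec_H_t H_t
  by_cases h : ∃ p, PatR si sj p ∨ PatL si sj p
  · rw [htGo_eq_one si sj _ _ ((hit_iff_pat si sj hpre).2 h), alt_one si sj h]
  · rw [htGo_eq_zero si sj _ _ (fun hx => h ((hit_iff_pat si sj hpre).1 hx)),
      alt_zero si sj h]
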